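-- pv_equiv track=rewrite | github.com/trin94/PySide6-project-template | build-aux/update_pyproject_file.py | determine_line_to_overwrite
-- ===== SOURCE A (Python) =====
-- def determine_line_to_overwrite(lines: list[str]) -> tuple[int, int]:
--     in_section = False
--     files_start: int | None = None
--
--     for i, raw in enumerate(lines):
--         line = raw.strip()
--
--         if not in_section:
--             if line == "[tool.pyside6-project]":
--                 in_section = True
--             continue
--
--         if files_start is None and line.startswith("files ="):
--             if line.endswith("]"):
--                 return i + 1, i + 1
--             files_start = i + 1
--             continue
--
--         if files_start is not None and ("]" in line) and not line.startswith("#"):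
--             return files_start, i + 1
--
--     if not in_section:
--         raise KeyError('Could not find "[tool.pyside6-project]" in pyproject.toml')
--     if files_start is None:
--         raise KeyError('Could not find "files" in "[tool.pyside6-project]" table in pyproject.toml')
--
--     raise ValueError('Could not update "files" in pyproject.toml')
-- ===== SOURCE B (Python) =====
-- def determine_line_to_overwrite(lines: list[str]) -> tuple[int, int]:
--     section = None
--     for s, raw in enumerate(lines):
--         if raw.strip() == "[tool.pyside6-project]":
--             section = s
--             break
--     if section is None:
--         raise KeyError('Could not find "[tool.pyside6-project]" in pyproject.toml')
--
--     files_line = None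
--     for i in range(section + 1, len(lines)):
--         if lines[i].strip().startswith("files ="):
--             files_line = i
--             break
--     if files_line is None:
--         raise KeyError('Could not find "files" in "[tool.pyside6-project]" table in pyproject.toml')
--
--     if lines[files_line].strip().endswith("]"):
--         return files_line + 1, files_line + 1
--
--     for j in range(files_line + 1, len(lines)):
--         line = lines[j].strip()
--         if "]" in line and not line.startswith("#"):
--             return files_line + 1, j + 1
--
--     raise ValueError('Could not update "files" in pyproject.toml')
-- ===== Notes on version B (the rewrite author's own statement) =====
-- stated objective: simpler
-- what changed: Replaced the single flag-driven state machine (in_section/files_start booleans threaded through one loop) by a find-then-parse decomposition: three consecutive straight-line searches (section header, first 'files =' line after it, first closing ']' line after that), each followed by its own raise.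
import Mathlib
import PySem

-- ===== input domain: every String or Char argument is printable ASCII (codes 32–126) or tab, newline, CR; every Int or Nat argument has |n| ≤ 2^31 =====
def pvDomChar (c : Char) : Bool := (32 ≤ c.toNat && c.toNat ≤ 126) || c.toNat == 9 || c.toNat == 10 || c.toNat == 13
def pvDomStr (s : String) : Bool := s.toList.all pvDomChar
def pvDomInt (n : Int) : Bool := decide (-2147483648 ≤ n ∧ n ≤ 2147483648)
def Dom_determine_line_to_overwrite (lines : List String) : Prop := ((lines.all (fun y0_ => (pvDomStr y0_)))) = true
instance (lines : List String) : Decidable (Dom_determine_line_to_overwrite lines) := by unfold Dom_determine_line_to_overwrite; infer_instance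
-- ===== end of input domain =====

-- B replaces A's flag-driven state machine by a find-then-parse decomposition (three
-- consecutive searches); same cost, plainer control flow. Pre_ excludes exactly the
-- inputs on which A raises (KeyError/ValueError); there B raises identically.

-- ===== PORT A =====
-- literal port of A's state machine: i = enumerate index, states (in_section, files_start);
-- (0, 0) stands for the raise paths, all outside Pre_.
def pvGoA : List String → Nat → Bool → Option Nat → Int × Int
  | [], _, _, _ => (0, 0)
  | raw :: rest, i, false, filesStart =>
    let line := PySem.Str.strip raw
    if line == "[tool.pyside6-project]" then pvGoA rest (i+1) true filesStart
    else pvGoA rest (i+1) false filesStart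
  | raw :: rest, i, true, none =>
    let line := PySem.Str.strip raw
    if PySem.Str.startswith line "files =" then
      (if PySem.Str.endswith line "]" then ((i:Int)+1, (i:Int)+1)
       else pvGoA rest (i+1) true (some (i+1)))
    else pvGoA rest (i+1) true none
  | raw :: rest, i, true, some fs =>
    let line := PySem.Str.strip raw
    if PySem.Str.isIn "]" line && !PySem.Str.startswith line "#" then ((fs:Int), (i:Int)+1)
    else pvGoA rest (i+1) true (some fs)

def determine_line_to_overwrite (lines : List String) : Int × Int :=
  pvGoA lines 0 false none

-- ===== PORT B =====
-- the three line predicates B searches for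
def pvIsSec (r : String) : Bool := PySem.Str.strip r == "[tool.pyside6-project]"
def pvIsFiles (r : String) : Bool := PySem.Str.startswith (PySem.Str.strip r) "files ="
def pvIsClose (r : String) : Bool :=
  PySem.Str.isIn "]" (PySem.Str.strip r) && !PySem.Str.startswith (PySem.Str.strip r) "#"

-- first index ≥ i whose line satisfies p; returns (index, line, remaining suffix)
def pvFindIdx (p : String → Bool) : List String → Nat → Option (Nat × String × List String)
  | [], _ => none
  | x :: xs, i => if p x then some (i, x, xs) else pvFindIdx p xs (i+1)

def determine_line_to_overwrite_alt (lines : List String) : Int × Int :=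
  match pvFindIdx pvIsSec lines 0 with
  | none => (0, 0)
  | some (s, _, r1) =>
    match pvFindIdx pvIsFiles r1 (s+1) with
    | none => (0, 0)
    | some (i, x, r2) =>
      if PySem.Str.endswith (PySem.Str.strip x) "]" then ((i:Int)+1, (i:Int)+1)
      else
        match pvFindIdx pvIsClose r2 (i+1) with
        | none => (0, 0)
        | some (j, _, _) => ((i:Int)+1, (j:Int)+1)

-- ===== PRECONDITION & SPEC =====
-- Pre_ holds exactly when A returns normally: a section header line exists, a 'files ='
-- line occurs after one, and either that line already ends with ']' or some later line
-- closes the list; outside Pre_ the Python A raises (KeyError or ValueError).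
def Pre_determine_line_to_overwrite (lines : List String) : Prop :=
  ∃ s : Fin lines.length, pvIsSec lines[s] = true ∧
    ∃ i : Fin lines.length, (s : Nat) < (i : Nat) ∧ pvIsFiles lines[i] = true ∧
      (PySem.Str.endswith (PySem.Str.strip lines[i]) "]" = true ∨
        ∃ j : Fin lines.length, (i : Nat) < (j : Nat) ∧ pvIsClose lines[j] = true)
instance (lines : List String) : Decidable (Pre_determine_line_to_overwrite lines) := by
  unfold Pre_determine_line_to_overwrite; infer_instance

def pvWitness_determine_line_to_overwrite : List String :=
  ["[tool.pyside6-project]", "files = [\"x\"]"]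

def Spec_determine_line_to_overwrite (lines : List String) (out : Int × Int) : Prop := out = determine_line_to_overwrite_alt lines
instance (lines : List String) (out : Int × Int) : Decidable (Spec_determine_line_to_overwrite lines out) := by unfold Spec_determine_line_to_overwrite; infer_instance

-- ===== CLAIM (what is proved, stated in full; the proofs are below) =====
def Claim_equal_determine_line_to_overwrite : Prop := ∀ (lines : List String), Dom_determine_line_to_overwrite lines → Pre_determine_line_to_overwrite lines → Spec_determine_line_to_overwrite lines (determine_line_to_overwrite lines)

-- ===== LEMMAS AND PROOFS =====

-- close-bracket phase: A with in_section and files_start set equals B's third search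
lemma goA_close (ls : List String) : ∀ (i fs : Nat),
    pvGoA ls i true (some fs) =
      (match pvFindIdx pvIsClose ls i with
       | none => (0, 0)
       | some (j, _, _) => ((fs : Int), (j : Int)+1)) := by
  induction ls with
  | nil => intro i fs; rfl
  | cons x xs ih =>
    intro i fs
    simp only [pvGoA, pvFindIdx, pvIsClose]
    split_ifs with h
    · simp
    · simp [ih]

-- files phase: A with in_section set and files_start unset equals B's second search
-- followed by its endswith test and third search
lemma goA_files (ls : List String) : ∀ (i : Nat),
    pvGoA ls i true none =
      (match pvFindIdx pvIsFiles ls i with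
       | none => (0, 0)
       | some (i', x, r) =>
         if PySem.Str.endswith (PySem.Str.strip x) "]" then ((i' : Int)+1, (i' : Int)+1)
         else
           match pvFindIdx pvIsClose r (i'+1) with
           | none => (0, 0)
           | some (j, _, _) => ((i' : Int)+1, (j : Int)+1)) := by
  induction ls with
  | nil => intro i; rfl
  | cons x xs ih =>
    intro i
    simp only [pvGoA, pvFindIdx, pvIsFiles]
    by_cases h : PySem.Str.startswith (PySem.Str.strip x) "files =" = true
    · rw [if_pos h, if_pos h]
      dsimp only
      by_cases h2 : PySem.Str.endswith (PySem.Str.strip x) "]" = true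
      · rw [if_pos h2, if_pos h2]
      · rw [if_neg h2, if_neg h2, goA_close]
        push_cast
        rfl
    · rw [if_neg h, if_neg h, ih]

-- section phase: A scanning with in_section unset equals B's first search then the files phase
lemma goA_section (ls : List String) : ∀ (i : Nat),
    pvGoA ls i false none =
      (match pvFindIdx pvIsSec ls i with
       | none => (0, 0)
       | some (s, _, r) => pvGoA r (s+1) true none) := by
  induction ls with
  | nil => intro i; rfl
  | cons x xs ih =>
    intro i
    simp only [pvGoA, pvFindIdx, pvIsSec]
    split_ifs with h
    · simp
    · simp [ih]

-- the two ports agree on every input (raise paths both mapped to (0, 0))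
lemma ports_agree (lines : List String) :
    determine_line_to_overwrite lines = determine_line_to_overwrite_alt lines := by
  unfold determine_line_to_overwrite determine_line_to_overwrite_alt
  rw [goA_section]
  cases hs : pvFindIdx pvIsSec lines 0 with
  | none => rfl
  | some v =>
    obtain ⟨s, _, r1⟩ := v
    simp only [goA_files]

-- ===== VERDICT (by name: the statement is the Claim_ definition above) =====
theorem determine_line_to_overwrite_spec : Claim_equal_determine_line_to_overwrite := by
  intro lines _ _
  exact ports_agree lines
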